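-- pv_equiv track=rewrite | github.com/antonmyronyuk/adventofcode2024 | day12/solution.py | get_border_edges
-- ===== SOURCE A (Python) =====
-- from collections import defaultdict, deque
--
-- def get_border_edges(region):
--     edges_count = defaultdict(int)
--     for i, j in region:
--         edges_count["W", i, j] += 1
--         edges_count["W", i, j + 1] += 1
--         edges_count["H", i, j] += 1
--         edges_count["H", i + 1, j] += 1
--
--     return [edge for edge, count in edges_count.items() if count == 1]
-- ===== SOURCE B (Python) =====
-- def _is_border(edge, cells):
--     t, a, b = edge
--     if t == "W":
--         return ((a, b) in cells) != ((a, b - 1) in cells)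
--     return ((a, b) in cells) != ((a - 1, b) in cells)
--
--
-- def get_border_edges(region):
--     cells = set(region)
--     all_edges = [
--         e
--         for i, j in region
--         for e in (("W", i, j), ("W", i, j + 1), ("H", i, j), ("H", i + 1, j))
--     ]
--     return [e for e in dict.fromkeys(all_edges) if _is_border(e, cells)]
-- ===== Notes on version B (the rewrite author's own statement) =====
-- stated objective: alternative
-- what changed: B replaces A's edge-multiplicity counter dict by a geometric test: it builds a set of the region's cells and keeps an edge iff exactly one of its two adjacent cells lies in the region, deduplicating edges in first-occurrence order.
import Mathlib
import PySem

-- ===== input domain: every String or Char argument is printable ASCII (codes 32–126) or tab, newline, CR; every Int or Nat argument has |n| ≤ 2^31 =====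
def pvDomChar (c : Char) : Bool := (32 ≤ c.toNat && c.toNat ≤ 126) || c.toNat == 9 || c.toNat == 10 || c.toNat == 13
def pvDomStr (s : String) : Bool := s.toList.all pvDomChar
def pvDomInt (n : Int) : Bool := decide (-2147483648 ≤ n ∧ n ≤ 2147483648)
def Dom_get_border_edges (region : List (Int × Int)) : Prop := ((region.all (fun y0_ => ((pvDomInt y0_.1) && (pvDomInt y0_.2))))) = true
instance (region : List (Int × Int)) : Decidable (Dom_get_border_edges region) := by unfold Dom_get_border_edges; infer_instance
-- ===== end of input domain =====

set_option maxRecDepth 8000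


-- B replaces A's edge-multiplicity counter by a geometric test (an edge is a border edge
-- iff exactly one of its two adjacent cells is in the region's cell set); objective: alternative.

-- ===== PORT A =====
def get_border_edges (region : List (Int × Int)) : List (String × Int × Int) :=
  let edges_count : PySem.Dict (String × Int × Int) Int :=
    region.foldl (fun d c =>
      ((((d.modify ("W", c.1, c.2) 0 (· + 1)).modify ("W", c.1, c.2 + 1) 0 (· + 1)).modify
          ("H", c.1, c.2) 0 (· + 1)).modify ("H", c.1 + 1, c.2) 0 (· + 1))) PySem.Dict.empty
  (edges_count.items.filter (fun p => p.2 == 1)).map (·.1)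

-- ===== PORT B =====
def pv_is_border (edge : String × Int × Int) (cells : PySem.Set (Int × Int)) : Bool :=
  if edge.1 == "W" then
    ((edge.2.1, edge.2.2) ∈ cells) != ((edge.2.1, edge.2.2 - 1) ∈ cells)
  else
    ((edge.2.1, edge.2.2) ∈ cells) != ((edge.2.1 - 1, edge.2.2) ∈ cells)

def get_border_edges_alt (region : List (Int × Int)) : List (String × Int × Int) :=
  let cells : PySem.Set (Int × Int) := PySem.Set.ofList region
  let all_edges : List (String × Int × Int) :=
    region.flatMap (fun c => [("W", c.1, c.2), ("W", c.1, c.2 + 1), ("H", c.1, c.2), ("H", c.1 + 1, c.2)])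
  (PySem.List.dedup all_edges).filter (fun e => pv_is_border e cells)

-- ===== PRECONDITION & SPEC =====
-- The Python parameter 'region' is a set of cells; Pre_ is that set's representation invariant
-- on the Lean side (the list holds distinct elements), so it excludes no Python input.
def Pre_get_border_edges (region : List (Int × Int)) : Prop := region.Nodup
instance (region : List (Int × Int)) : Decidable (Pre_get_border_edges region) := by unfold Pre_get_border_edges; infer_instance
def pvWitness_get_border_edges : (List (Int × Int)) := ([(0, 0), (0, 1), (1, 0)])

def Spec_get_border_edges (region : List (Int × Int)) (out : List (String × Int × Int)) : Prop := out = get_border_edges_alt region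
instance (region : List (Int × Int)) (out : List (String × Int × Int)) : Decidable (Spec_get_border_edges region out) := by unfold Spec_get_border_edges; infer_instance

-- ===== CLAIM (what is proved, stated in full; the proofs are below) =====
def Claim_equal_get_border_edges : Prop := ∀ (region : List (Int × Int)), Dom_get_border_edges region → Pre_get_border_edges region → Spec_get_border_edges region (get_border_edges region)

-- ===== LEMMAS AND PROOFS =====

def pvEKeys (c : Int × Int) : List (String × Int × Int) :=
  [("W", c.1, c.2), ("W", c.1, c.2 + 1), ("H", c.1, c.2), ("H", c.1 + 1, c.2)]

-- A's fold of four chained modifies is the counter over the flattened edge list.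
theorem pv_foldA_eq_counter (region : List (Int × Int)) :
    region.foldl (fun d c =>
      ((((d.modify ("W", c.1, c.2) 0 (· + 1)).modify ("W", c.1, c.2 + 1) 0 (· + 1)).modify
          ("H", c.1, c.2) 0 (· + 1)).modify ("H", c.1 + 1, c.2) 0 (· + 1)))
      (PySem.Dict.empty : PySem.Dict (String × Int × Int) Int)
    = PySem.Dict.counter (region.flatMap pvEKeys) := by
  rw [PySem.Dict.counter_eq_foldl]
  generalize (PySem.Dict.empty : PySem.Dict (String × Int × Int) Int) = d
  induction region generalizing d with
  | nil => rfl
  | cons c cs ih => simp [List.flatMap_cons, pvEKeys, List.foldl, ih]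

theorem pv_count_eKeys (c : Int × Int) (s : String) (i j : Int) :
    List.count (s, i, j) (pvEKeys c) =
      (if (s, i, j) = ("W", c.1, c.2) then 1 else 0) + (if (s, i, j) = ("W", c.1, c.2 + 1) then 1 else 0)
      + (if (s, i, j) = ("H", c.1, c.2) then 1 else 0) + (if (s, i, j) = ("H", c.1 + 1, c.2) then 1 else 0) := by
  obtain ⟨a, b⟩ := c
  by_cases hw : s = "W"
  · subst hw
    simp only [pvEKeys, List.count_cons, List.count_nil, beq_iff_eq, Prod.mk.injEq,
      String.reduceEq, false_and, if_false, true_and]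
    split_ifs <;> omega
  · by_cases hh : s = "H"
    · subst hh
      simp only [pvEKeys, List.count_cons, List.count_nil, beq_iff_eq, Prod.mk.injEq,
        String.reduceEq, false_and, if_false, true_and]
      split_ifs <;> omega
    · simp [pvEKeys, List.count_cons, Prod.mk.injEq, hw, hh]
      exact ⟨⟨⟨fun h _ => absurd h.symm hh, fun h _ => absurd h.symm hh⟩,
        fun h _ => absurd h.symm hw⟩, fun h _ => absurd h.symm hw⟩
theorem pv_count_W (region : List (Int × Int)) (i j : Int) :
    List.count ("W", i, j) (region.flatMap pvEKeys)
      = List.count (i, j) region + List.count (i, j - 1) region := by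
  induction region with
  | nil => simp
  | cons c cs ih =>
    obtain ⟨a, b⟩ := c
    simp only [List.flatMap_cons, List.count_append, ih, List.count_cons, pv_count_eKeys,
      beq_iff_eq, Prod.mk.injEq, String.reduceEq, false_and, if_false, true_and]
    split_ifs <;> omega
theorem pv_count_H (region : List (Int × Int)) (i j : Int) :
    List.count ("H", i, j) (region.flatMap pvEKeys)
      = List.count (i, j) region + List.count (i - 1, j) region := by
  induction region with
  | nil => simp
  | cons c cs ih =>
    obtain ⟨a, b⟩ := c
    simp only [List.flatMap_cons, List.count_append, ih, List.count_cons, pv_count_eKeys,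
      beq_iff_eq, Prod.mk.injEq, String.reduceEq, false_and, if_false, true_and]
    split_ifs <;> omega

theorem pv_count_nodup (region : List (Int × Int)) (h : region.Nodup) (c : Int × Int) :
    List.count c region = if c ∈ region then 1 else 0 := by
  split_ifs with hm
  · exact List.count_eq_one_of_mem h hm
  · simpa using List.count_eq_zero.mpr hm

-- The pointwise agreement of the two keep-tests on edges that actually occur, given Nodup.
theorem pv_pred_agree (region : List (Int × Int)) (h : region.Nodup)
    (e : String × Int × Int) (he : e ∈ region.flatMap pvEKeys) :
    (((List.count e (region.flatMap pvEKeys) : Int)) == 1) = pv_is_border e (PySem.Set.ofList region) := by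
  obtain ⟨s, i, j⟩ := e
  have hs : s = "W" ∨ s = "H" := by
    simp only [List.mem_flatMap, pvEKeys, List.mem_cons, List.not_mem_nil, or_false,
      Prod.mk.injEq] at he
    obtain ⟨c, -, hc⟩ := he
    rcases hc with ⟨h, -⟩ | ⟨h, -⟩ | ⟨h, -⟩ | ⟨h, -⟩ <;> simp [h]
  have hmem : ∀ c : Int × Int, ((c ∈ PySem.Set.ofList region) : Bool) = (if c ∈ region then true else false) := by
    intro c
    by_cases hc : c ∈ region
    · simp [hc, (PySem.Set.mem_ofList region c).mpr hc]
    · simp [hc]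
  rcases hs with hs | hs <;> subst hs
  · simp only [pv_is_border, pv_count_W, pv_count_nodup region h, hmem]
    split_ifs <;> simp_all
  · simp only [pv_is_border, pv_count_H, pv_count_nodup region h, hmem]
    split_ifs <;> simp_all

-- ===== VERDICT (by name: the statement is the Claim_ definition above) =====
theorem pv_A_eq (region : List (Int × Int)) :
    get_border_edges region =
      ((region.foldl (fun d c =>
        ((((d.modify ("W", c.1, c.2) 0 (· + 1)).modify ("W", c.1, c.2 + 1) 0 (· + 1)).modify
            ("H", c.1, c.2) 0 (· + 1)).modify ("H", c.1 + 1, c.2) 0 (· + 1)))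
        (PySem.Dict.empty : PySem.Dict (String × Int × Int) Int)).items.filter
          (fun p => p.2 == 1)).map (·.1) := rfl

theorem pv_B_eq (region : List (Int × Int)) :
    get_border_edges_alt region =
      (PySem.List.dedup (region.flatMap pvEKeys)).filter
        (fun e => pv_is_border e (PySem.Set.ofList region)) := rfl

theorem get_border_edges_spec : Claim_equal_get_border_edges := by
  intro region _ hpre
  unfold Spec_get_border_edges
  rw [pv_A_eq, pv_B_eq]
  rw [pv_foldA_eq_counter, PySem.Dict.items_counter, List.filter_map, List.map_map,
    PySem.List.dedup_eq_ofList]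
  have : ∀ l : List (String × Int × Int),
      (∀ e ∈ l, e ∈ region.flatMap pvEKeys) →
      (l.filter ((fun p => p.2 == 1) ∘ fun k => (k, (List.count k (region.flatMap pvEKeys) : Int)))).map
          ((fun p : (String × Int × Int) × Int => p.1) ∘ fun k => (k, (List.count k (region.flatMap pvEKeys) : Int)))
        = l.filter (fun e => pv_is_border e (PySem.Set.ofList region)) := by
    intro l
    induction l with
    | nil => intro _; rfl
    | cons x xs ih =>
      intro hmem
      have hx := pv_pred_agree region hpre x (hmem x (List.mem_cons_self))
      simp only [List.filter_cons, Function.comp]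
      by_cases hb : pv_is_border x (PySem.Set.ofList region) = true
      · simp only [hx, hb, if_true, List.map_cons]
        exact congrArg (x :: ·) (ih fun e he => hmem e (List.mem_cons_of_mem _ he))
      · simp only [hx, eq_false_of_ne_true hb, Bool.false_eq_true, if_false]
        exact ih fun e he => hmem e (List.mem_cons_of_mem _ he)
  exact this (PySem.Set.ofList (region.flatMap pvEKeys))
    (fun e he => (PySem.Set.mem_ofList _ e).mp he)
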